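-- pv_equiv track=rewrite | github.com/skato21/BayesOptimization | 2023/GUI/GeneralOptimizerUI_ver14.py | getBestValues
-- ===== SOURCE A (Python) =====
-- def getBestValues(Y_values_list) :
--     val = Y_values_list[0]
--     plots = [[0], [Y_values_list[0]]]
--     for i in range(0, len(Y_values_list) ) :
--         if val > Y_values_list[i] :
--             val = Y_values_list[i]
--             plots[0].append(i)
--             plots[1].append(val)
--     return plots
-- ===== SOURCE B (Python) =====
-- def getBestValues(Y_values_list):
--     # pass 1: prefix-minimum table
--     m = []
--     cur = Y_values_list[0]
--     for y in Y_values_list: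
--         cur = y if y < cur else cur
--         m.append(cur)
--     # pass 2: drop points of the table
--     idxs = [0]
--     vals = [m[0]]
--     for i in range(1, len(m)):
--         if m[i] < m[i - 1]:
--             idxs.append(i)
--             vals.append(m[i])
--     return [idxs, vals]
-- ===== Notes on version B (the rewrite author's own statement) =====
-- stated objective: alternative
-- what changed: B first builds the full prefix-minimum table in one pass and then detects strict drops between consecutive table entries in a second pass, instead of A's fused loop that tracks the running minimum inline while appending.
import Mathlib
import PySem

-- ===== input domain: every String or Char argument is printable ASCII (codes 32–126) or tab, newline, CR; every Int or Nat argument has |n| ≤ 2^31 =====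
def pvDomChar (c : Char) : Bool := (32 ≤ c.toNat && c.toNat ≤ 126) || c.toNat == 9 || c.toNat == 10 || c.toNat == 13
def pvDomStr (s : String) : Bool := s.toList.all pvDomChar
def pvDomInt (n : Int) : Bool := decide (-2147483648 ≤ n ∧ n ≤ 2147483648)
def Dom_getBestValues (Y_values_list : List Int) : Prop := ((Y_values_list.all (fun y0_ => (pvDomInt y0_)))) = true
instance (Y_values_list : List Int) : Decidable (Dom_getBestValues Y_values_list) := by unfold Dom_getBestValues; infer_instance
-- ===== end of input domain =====

-- B builds a prefix-minimum table first and then scans it for strict drops (two passes),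
-- instead of A's single fused loop tracking the running minimum inline; equal cost, alternative decomposition.

-- ===== PORT A =====
-- A's loop: for i over the list, tracking val and appending (i, val) on a strict new minimum.
def getBestValuesLoop (Y : List Int) (i : Int) (val : Int) (idxs vals : List Int) : List Int × List Int :=
  match Y with
  | [] => (idxs, vals)
  | y :: rest =>
    if val > y then getBestValuesLoop rest (i + 1) y (idxs ++ [i]) (vals ++ [y])
    else getBestValuesLoop rest (i + 1) val idxs vals

def getBestValues (Y_values_list : List Int) : List (List Int) :=
  match Y_values_list with
  | [] => []   -- Python raises IndexError here; excluded by Pre_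
  | y0 :: _ =>
    let st := getBestValuesLoop Y_values_list 0 y0 [0] [y0]
    [st.1, st.2]

-- ===== PORT B =====
-- pass 1 of Source B: the prefix-minimum table m
def buildPrefixMin (Y : List Int) (cur : Int) : List Int :=
  match Y with
  | [] => []
  | y :: rest =>
    let c := if y < cur then y else cur
    c :: buildPrefixMin rest c

-- pass 2 of Source B: strict drops between consecutive table entries
def scanDrops (prev : Int) (rest : List Int) (i : Int) (idxs vals : List Int) : List Int × List Int :=
  match rest with
  | [] => (idxs, vals)
  | x :: r =>
    if x < prev then scanDrops x r (i + 1) (idxs ++ [i]) (vals ++ [x])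
    else scanDrops x r (i + 1) idxs vals

def getBestValues_alt (Y_values_list : List Int) : List (List Int) :=
  match Y_values_list with
  | [] => []   -- Python raises IndexError here; excluded by Pre_
  | y0 :: _ =>
    match buildPrefixMin Y_values_list y0 with
    | [] => []   -- unreachable: the table has the list's length
    | m0 :: mr =>
      let st := scanDrops m0 mr 1 [0] [m0]
      [st.1, st.2]

-- ===== PRECONDITION & SPEC =====
-- Pre_ excludes only the empty list, on which Python A raises IndexError (Y_values_list[0]).
def Pre_getBestValues (Y_values_list : List Int) : Prop := Y_values_list ≠ []
instance (Y_values_list : List Int) : Decidable (Pre_getBestValues Y_values_list) := by unfold Pre_getBestValues; infer_instance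
def pvWitness_getBestValues : List Int := [3, 1, 2, 0]

def Spec_getBestValues (Y_values_list : List Int) (out : List (List Int)) : Prop := out = getBestValues_alt Y_values_list
instance (Y_values_list : List Int) (out : List (List Int)) : Decidable (Spec_getBestValues Y_values_list out) := by unfold Spec_getBestValues; infer_instance

-- ===== CLAIM (what is proved, stated in full; the proofs are below) =====
def Claim_equal_getBestValues : Prop := ∀ (Y_values_list : List Int), Dom_getBestValues Y_values_list → Pre_getBestValues Y_values_list → Spec_getBestValues Y_values_list (getBestValues Y_values_list)

-- ===== LEMMAS AND PROOFS =====
-- A's fused loop equals B's scan of the prefix-min table built from the same seed.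
theorem loop_eq_scan (Y : List Int) : ∀ (val i : Int) (idxs vals : List Int),
    getBestValuesLoop Y i val idxs vals = scanDrops val (buildPrefixMin Y val) i idxs vals := by
  induction Y with
  | nil => intro val i idxs vals; simp [getBestValuesLoop, buildPrefixMin, scanDrops]
  | cons y rest ih =>
    intro val i idxs vals
    by_cases h : y < val
    · simp [getBestValuesLoop, buildPrefixMin, scanDrops, h, ih]
    · simp [getBestValuesLoop, buildPrefixMin, scanDrops, h, ih]

-- ===== VERDICT (by name: the statement is the Claim_ definition above) =====
theorem getBestValues_spec : Claim_equal_getBestValues := by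
  intro Y _ hpre
  unfold Spec_getBestValues
  match Y with
  | [] => exact absurd rfl hpre
  | y0 :: rest =>
    show getBestValues (y0 :: rest) = getBestValues_alt (y0 :: rest)
    have hb : buildPrefixMin (y0 :: rest) y0 = y0 :: buildPrefixMin rest y0 := by
      simp [buildPrefixMin]
    have hA : getBestValuesLoop (y0 :: rest) 0 y0 [0] [y0]
        = getBestValuesLoop rest 1 y0 [0] [y0] := by
      simp [getBestValuesLoop]
    simp only [getBestValues, getBestValues_alt, hb, hA, loop_eq_scan]
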